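-- pv_equiv track=rewrite | github.com/pypi-data/pypi-mirror-189 | packages/projecteer/projecteer-0.1.11.tar.gz/projecteer-0.1.11/projecteer/parse/__init__.py | escaped
-- ===== SOURCE A (Python) =====
-- ESCAPE: str = "\\"
--
-- def escaped(line: str) -> str:
--     """
-- 		Returns a str of [line], where all characters after '\\\\'(backslash) have been removed
--
-- 		example:
-- 		```py
-- 			line = "some command with \\"
-- 			escaped(line) # "I didnt doanything
-- 		```
-- 		"""
--
--     tmp = ""  # will hold the escaped string
--     lastSlice = -2  # starts at -2 because this should be without 'correction' the index of the last slice
--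
--     for i in range(len(line)):
--         char = line[i]
--
--         if char is ESCAPE:
--             tmp += line[lastSlice+2:i]
--             lastSlice = i
--
--     tmp += line[lastSlice+2:-1]
--
--     return tmp
-- ===== SOURCE B (Python) =====
-- ESCAPE: str = "\\"
--
-- def escaped(line: str) -> str:
--     parts = line[:-1].split(ESCAPE)
--     return parts[0] + "".join(p[1:] for p in parts[1:])
-- ===== Notes on version B (the rewrite author's own statement) =====
-- stated objective: faster
-- what changed: Replaces A's manual per-character index scan with lastSlice bookkeeping by one split on the backslash, keeping the first piece and dropping the leading character of every later piece.
import Mathlib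
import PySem

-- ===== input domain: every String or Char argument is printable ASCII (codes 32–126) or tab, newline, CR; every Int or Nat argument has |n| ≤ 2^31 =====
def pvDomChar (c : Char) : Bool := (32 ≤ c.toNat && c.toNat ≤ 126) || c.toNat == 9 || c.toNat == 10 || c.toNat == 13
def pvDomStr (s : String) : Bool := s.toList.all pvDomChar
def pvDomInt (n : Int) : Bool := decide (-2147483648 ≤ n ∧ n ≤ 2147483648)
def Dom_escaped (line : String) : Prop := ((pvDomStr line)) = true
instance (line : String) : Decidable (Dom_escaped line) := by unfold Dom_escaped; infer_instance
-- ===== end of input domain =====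

-- B replaces A's manual index scan with slice bookkeeping by one split on the backslash
-- followed by reassembly (same O(n) work, measured constant-factor faster).

-- ===== PORT A =====
-- literal transliteration of A: a fold over range(len(line)) carrying (tmp, lastSlice),
-- appending line[lastSlice+2:i] at each backslash, then line[lastSlice+2:-1] at the end
def escaped (line : String) : String :=
  let s := line.toList
  let st := (PySem.List.pyRange 0 (s.length : Int) 1).foldl
    (fun (st : List Char × Int) i =>
      let char := PySem.List.pyGetD s i ' '
      if char = '\\' then (st.1 ++ PySem.List.slice s (some (st.2 + 2)) (some i), i)
      else st)
    ([], -2)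
  String.ofList (st.1 ++ PySem.List.slice s (some (st.2 + 2)) (some (-1)))

-- ===== PORT B =====
-- literal transliteration of Source B: parts = line[:-1].split('\\');
-- return parts[0] + ''.join(p[1:] for p in parts[1:])
def escaped_alt (line : String) : String :=
  let parts := PySem.Chars.splitOn (PySem.List.slice line.toList none (some (-1))) ['\\']
  String.ofList
    (PySem.List.pyGetD parts 0 [] ++
      PySem.Chars.join []
        ((PySem.List.slice parts (some 1) none).map
          (fun p => PySem.List.slice p (some 1) none)))

-- ===== PRECONDITION & SPEC =====
def Spec_escaped (line : String) (out : String) : Prop := out = escaped_alt line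
instance (line : String) (out : String) : Decidable (Spec_escaped line out) := by unfold Spec_escaped; infer_instance

-- ===== CLAIM (what is proved, stated in full; the proofs are below) =====
def Claim_equal_escaped : Prop := ∀ (line : String), Dom_escaped line → Spec_escaped line (escaped line)

-- ===== LEMMAS AND PROOFS =====

-- common specification: keep a char iff it is not a backslash and not preceded by one
-- (skip = the previous char was a backslash); both programs compute this on dropLast
def specP : Bool → List Char → List Char
  | _, [] => []
  | skip, c :: r =>
    if c = '\\' then specP true r
    else (if skip then [] else [c]) ++ specP false r

-- structural counterpart of split('\')
def mySplit : List Char → List Char → List (List Char)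
  | pre, [] => [pre]
  | pre, c :: r => if c = '\\' then pre :: mySplit [] r else mySplit (pre ++ [c]) r

theorem mySplit_ne_nil (pre l : List Char) : mySplit pre l ≠ [] := by
  induction l generalizing pre with
  | nil => simp [mySplit]
  | cons c r ih => by_cases h : c = '\\' <;> simp [mySplit, h, ih]

theorem mySplit_modifyHead (pre l : List Char) :
    mySplit pre l = (mySplit [] l).modifyHead (pre ++ ·) := by
  induction l generalizing pre with
  | nil => simp [mySplit]
  | cons c r ih =>
    by_cases h : c = '\\'
    · simp [mySplit, h]
    · simp only [mySplit, h, if_false]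
      rw [ih (pre ++ [c])]
      simp only [List.nil_append]
      rw [ih [c]]
      cases hms : mySplit [] r with
      | nil => exact absurd hms (mySplit_ne_nil [] r)
      | cons p ps => simp

theorem go_eq_mySplit : ∀ (fuel : Nat) (l cur : List Char) (acc : List (List Char)),
    l.length < fuel →
    PySem.Chars.splitOn.go ['\\'] fuel l cur acc = acc.reverse ++ mySplit cur.reverse l := by
  intro fuel
  induction fuel with
  | zero => intro l cur acc h; omega
  | succ f ih =>
    intro l cur acc h
    cases l with
    | nil => simp [PySem.Chars.splitOn.go, mySplit]
    | cons c rest =>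
      by_cases hc : c = '\\'
      · subst hc
        have hp : (['\\'].isPrefixOf ('\\' :: rest)) = true := by simp [List.isPrefixOf]
        simp only [PySem.Chars.splitOn.go, hp, if_true, List.length_singleton, List.drop_one,
          List.tail_cons]
        rw [ih rest [] (cur.reverse :: acc) (by simpa using Nat.lt_of_succ_lt_succ h)]
        simp [mySplit]
      · have hp : (['\\'].isPrefixOf (c :: rest)) = false := by
          simp [List.isPrefixOf]
          exact fun h => hc h.symm
        simp only [PySem.Chars.splitOn.go, hp, Bool.false_eq_true, if_false]
        rw [ih rest (c :: cur) acc (by simpa using Nat.lt_of_succ_lt_succ h)]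
        simp [mySplit, hc]

theorem splitOn_eq_mySplit (l : List Char) :
    PySem.Chars.splitOn l ['\\'] = mySplit [] l := by
  unfold PySem.Chars.splitOn
  rw [go_eq_mySplit (l.length + 1) l [] [] (by omega)]
  simp

theorem join_nil_flatten (ps : List (List Char)) :
    PySem.Chars.join [] ps = ps.flatten := by
  induction ps with
  | nil => rfl
  | cons p t ih =>
    cases t with
    | nil => simp [PySem.Chars.join, List.intercalate]
    | cons q u =>
      simp only [PySem.Chars.join, List.intercalate] at ih ⊢
      simp_all [List.intersperse]

-- the value B assembles from the split of l (l is the line without its last char)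
def asmB (l : List Char) : List Char :=
  PySem.List.pyGetD (mySplit [] l) 0 [] ++
    ((mySplit [] l).tail.map (fun p => p.drop 1)).flatten

theorem asmB_spec (l : List Char) :
    asmB l = specP false l ∧
      ((mySplit [] l).map (fun p => p.drop 1)).flatten = specP true l := by
  induction l with
  | nil => simp [asmB, mySplit, specP]
  | cons c r ih =>
    obtain ⟨ih1, ih2⟩ := ih
    by_cases hc : c = '\\'
    · subst hc
      refine ⟨?_, ?_⟩
      · simpa [asmB, mySplit, specP] using ih2
      · simpa [mySplit, specP] using ih2
    · have hcons : mySplit [] (c :: r) = (mySplit [] r).modifyHead (c :: ·) := by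
        simp only [mySplit, hc, if_false, List.nil_append]
        simpa using mySplit_modifyHead [c] r
      cases hms : mySplit [] r with
      | nil => exact absurd hms (mySplit_ne_nil [] r)
      | cons p ps =>
        have h1 : asmB r = p ++ (ps.map (fun q => q.drop 1)).flatten := by
          simp [asmB, hms]
        refine ⟨?_, ?_⟩
        · simp only [asmB, hcons, hms, List.modifyHead, specP, hc, if_false]
          rw [← ih1, h1]
          simp
        · simp only [hcons, hms, List.modifyHead, specP, hc, if_false]
          rw [← ih1, h1]
          simp

-- the value A's loop produces from (pending slice, rest of the line); skip = the previous
-- char was a backslash (then the pending slice is empty)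
def loopG : Bool → List Char → List Char → List Char
  | _, pend, [] => pend.dropLast
  | skip, pend, c :: rest =>
    if c = '\\' then pend ++ loopG true [] rest
    else if skip then loopG false [] rest else loopG false (pend ++ [c]) rest

theorem loopG_spec : ∀ (l pend : List Char) (skip : Bool), (skip = true → pend = []) →
    loopG skip pend l = if l = [] then pend.dropLast else pend ++ specP skip l.dropLast := by
  intro l
  induction l with
  | nil => intro pend skip _; simp [loopG]
  | cons c r ih =>
    intro pend skip hinv
    by_cases hc : c = '\\'
    · subst hc
      simp only [loopG, reduceCtorEq, if_false]
      rw [ih [] true (fun _ => rfl)]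
      cases r with
      | nil => cases skip <;> simp [specP]
      | cons d t =>
        have hsp : specP skip (('\\' :: d :: t).dropLast) = specP true ((d :: t).dropLast) := by
          cases skip <;> simp [specP]
        rw [hsp]
        simp
    · simp only [loopG, if_neg hc, reduceCtorEq, if_false]
      cases hskip : skip with
      | true =>
        have hpend := hinv hskip
        subst hpend
        rw [ih [] false (by simp)]
        cases r with
        | nil => simp [specP]
        | cons d t => simp [specP, hc]
      | false =>
        rw [ih (pend ++ [c]) false (by simp)]
        cases r with
        | nil => simp [specP]
        | cons d t => simp [specP, hc]

-- x[a:-1] for a ≥ 0, as drop/take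
theorem slice_nonneg_neg_one (s : List Char) (a : Int) (h0 : 0 ≤ a) :
    PySem.List.slice s (some a) (some (-1)) =
      (s.drop a.toNat).take (s.length - 1 - a.toNat) := by
  simp only [PySem.List.slice, PySem.List.clampIdx]
  have hne : ¬ a < 0 := by omega
  by_cases hlen : s.length = 0
  · simp [hlen]
  · rw [if_pos (by norm_num), if_neg hne, if_neg (by omega)]
    by_cases hle : a.toNat ≤ s.length
    · have : min a.toNat s.length = a.toNat := by omega
      rw [this]
      congr 1
      omega
    · have hmin : min a.toNat s.length = s.length := by omega
      rw [hmin]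
      rw [List.drop_of_length_le (by omega), List.drop_of_length_le (by omega)]
      simp

-- the fold A performs, named so the invariant can speak about it
def stepA (s : List Char) (st : List Char × Int) (i : Int) : List Char × Int :=
  let char := PySem.List.pyGetD s i ' '
  if char = '\\' then (st.1 ++ PySem.List.slice s (some (st.2 + 2)) (some i), i)
  else st

theorem foldA_invariant (s : List Char) :
    ∀ (u : List Char) (k : Nat) (tmp : List Char) (ls : Int),
      u = s.drop k → k ≤ s.length → 0 ≤ ls + 2 → ls + 2 ≤ (k : Int) + 1 →
      (let st := (PySem.List.pyRange (k : Int) (s.length : Int) 1).foldl (stepA s) (tmp, ls)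
       st.1 ++ PySem.List.slice s (some (st.2 + 2)) (some (-1)))
      = tmp ++ loopG (decide (ls + 2 = (k : Int) + 1))
          ((s.drop (ls + 2).toNat).take (k - (ls + 2).toNat)) u := by
  intro u
  induction u generalizing s with
  | nil =>
    intro k tmp ls hu hk h0 h1
    have hkn : k = s.length := by
      have := congrArg List.length hu
      simp at this
      omega
    subst hkn
    rw [PySem.List.pyRange_one_eq_nil (by omega)]
    simp only [List.foldl_nil, loopG]
    rw [slice_nonneg_neg_one s (ls + 2) h0]
    congr 1
    rw [List.dropLast_eq_take, List.take_take]
    congr 1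
    simp only [List.length_take, List.length_drop]
    omega
  | cons c rest ih =>
    intro k tmp ls hu hk h0 h1
    have hklt : k < s.length := by
      by_contra hge
      rw [List.drop_of_length_le (by omega)] at hu
      exact (List.cons_ne_nil c rest) hu
    have hget : s[k]? = some c := by
      have : (s.drop k)[0]? = some c := by rw [← hu]; rfl
      simpa using this
    have hrest : rest = s.drop (k + 1) := by
      have := congrArg List.tail hu
      simpa [List.tail_drop] using this
    rw [PySem.List.pyRange_one_cons (by exact_mod_cast hklt)]
    simp only [List.foldl_cons]
    have hchar : PySem.List.pyGetD s (k : Int) ' ' = c := by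
      rw [PySem.List.pyGetD_natCast]
      simp [List.getD, hget]
    by_cases hc : c = '\\'
    · -- the char at k is a backslash: append the pending slice, lastSlice := k
      have hstep : stepA s (tmp, ls) (k : Int)
          = (tmp ++ PySem.List.slice s (some (ls + 2)) (some (k : Int)), (k : Int)) := by
        simp [stepA, hchar, hc]
      rw [hstep]
      have h1' : ((k : Int)) + 2 ≤ ((k + 1 : Nat) : Int) + 1 := by push_cast; omega
      have := ih s (k + 1) (tmp ++ PySem.List.slice s (some (ls + 2)) (some (k : Int)))
        (k : Int) hrest (by omega) (by omega) h1'
      push_cast at this ⊢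
      rw [this]
      have hskip : (decide ((k : Int) + 2 = (k : Int) + 1 + 1)) = true := by
        simp only [decide_eq_true_eq]; omega
      have hpend0 : (s.drop ((k : Int) + 2).toNat).take ((k + 1) - ((k : Int) + 2).toNat) = [] := by
        have : ((k : Int) + 2).toNat = k + 2 := by omega
        rw [this]
        have : k + 1 - (k + 2) = 0 := by omega
        rw [this, List.take_zero]
      rw [hskip, hpend0]
      have hpendeq : PySem.List.slice s (some (ls + 2)) (some (k : Int))
          = (s.drop (ls + 2).toNat).take (k - (ls + 2).toNat) := by
        rw [PySem.List.slice_toNat s h0 (by positivity)]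
        simp
      rw [hpendeq]
      simp [loopG, hc]
    · -- ordinary char: state unchanged
      have hstep : stepA s (tmp, ls) (k : Int) = (tmp, ls) := by
        simp [stepA, hchar, hc]
      rw [hstep]
      have := ih s (k + 1) tmp ls hrest (by omega) h0 (by push_cast; omega)
      push_cast at this ⊢
      rw [this]
      congr 1
      by_cases hsk : ls + 2 = (k : Int) + 1
      · -- skip state: previous char was a backslash, pending stays empty
        have hsk2 : ¬ (ls + 2 = (k : Int) + 1 + 1) := by omega
        have ha : (ls + 2).toNat = k + 1 := by omega
        rw [decide_eq_true hsk, decide_eq_false hsk2, ha]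
        have e1 : k - (k + 1) = 0 := by omega
        have e2 : k + 1 - (k + 1) = 0 := by omega
        rw [e1, e2, List.take_zero]
        simp [loopG, hc]
      · -- normal state: pending grows by c
        have hlt : ls + 2 ≤ (k : Int) := by omega
        have hsk2 : ¬ (ls + 2 = (k : Int) + 1 + 1) := by omega
        rw [decide_eq_false hsk, decide_eq_false hsk2]
        have ha : (ls + 2).toNat ≤ k := by omega
        have hgrow : (s.drop (ls + 2).toNat).take ((k + 1) - (ls + 2).toNat)
            = (s.drop (ls + 2).toNat).take (k - (ls + 2).toNat) ++ [c] := by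
          have hidx : (s.drop (ls + 2).toNat)[k - (ls + 2).toNat]? = some c := by
            rw [List.getElem?_drop]
            rw [show (ls + 2).toNat + (k - (ls + 2).toNat) = k by omega]
            exact hget
          rw [show (k + 1) - (ls + 2).toNat = (k - (ls + 2).toNat) + 1 by omega]
          rw [List.take_add_one, hidx]
          rfl
        rw [hgrow]
        simp [loopG, hc]

-- A computes specP false on dropLast of the line
theorem escaped_eq_spec (line : String) :
    escaped line = String.ofList (specP false line.toList.dropLast) := by
  have h := foldA_invariant line.toList line.toList 0 [] (-2) rfl (by omega)
    (by omega) (by omega)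
  unfold stepA at h
  simp only [Nat.cast_zero] at h
  unfold escaped
  dsimp only
  refine congrArg String.ofList ?_
  rw [h]
  norm_num
  rw [loopG_spec line.toList [] false (by simp)]
  cases hl : line.toList <;> simp [specP]

-- B computes the same
theorem escaped_alt_eq_spec (line : String) :
    escaped_alt line = String.ofList (specP false line.toList.dropLast) := by
  unfold escaped_alt
  dsimp only
  rw [PySem.List.slice_to_neg_one, splitOn_eq_mySplit, PySem.List.slice_from_one,
    join_nil_flatten]
  congr 1
  have := (asmB_spec line.toList.dropLast).1
  rw [← this]
  unfold asmB
  congr 1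
  congr 1
  exact List.map_congr_left (fun p _ => by
    rw [PySem.List.slice_from_one, List.drop_one])

-- ===== VERDICT (by name: the statement is the Claim_ definition above) =====
theorem escaped_spec : Claim_equal_escaped := by
  intro line _
  unfold Spec_escaped
  rw [escaped_eq_spec, escaped_alt_eq_spec]
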